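-- pv_equiv track=rewrite | github.com/udonehn/Algorithm | 백준/Gold/2636. 치즈/치즈.py | check
-- ===== SOURCE A (Python) =====
-- dx=[0,0,1,-1]
--
-- dy=[1,-1,0,0]
--
-- def check(arr,col,row):
--     c=[]
--     for i in range(col):
--         for j in range(row):
--             if arr[i][j]==1:
--                 cnt=0
--                 for k in range(4):
--                     x,y=j+dx[k],i+dy[k]
--                     if x<0 or x>=row or y<0 or y>=col:
--                         continue
--                     if arr[y][x]<=-1:
--                         cnt+=1
--                 if cnt>0:
--                     c.append((j,i))
--     return c
-- ===== SOURCE B (Python) =====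
-- def check(arr, col, row):
--     touched = set()
--     for i in range(col):
--         for j in range(row):
--             if arr[i][j] <= -1:
--                 for nj, ni in ((j + 1, i), (j - 1, i), (j, i + 1), (j, i - 1)):
--                     if 0 <= nj < row and 0 <= ni < col and arr[ni][nj] == 1:
--                         touched.add((nj, ni))
--     return [(j, i) for i in range(col) for j in range(row) if (j, i) in touched]
-- ===== Notes on version B (the rewrite author's own statement) =====
-- stated objective: alternative
-- what changed: Instead of scanning cheese cells and counting their <=-1 neighbors with a dx/dy inner loop, B iterates over the marked (<=-1) air cells, marks each in-bounds cheese neighbor in a 'touched' set, and then emits the touched cells in a separate ordered row-major pass.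
import Mathlib
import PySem

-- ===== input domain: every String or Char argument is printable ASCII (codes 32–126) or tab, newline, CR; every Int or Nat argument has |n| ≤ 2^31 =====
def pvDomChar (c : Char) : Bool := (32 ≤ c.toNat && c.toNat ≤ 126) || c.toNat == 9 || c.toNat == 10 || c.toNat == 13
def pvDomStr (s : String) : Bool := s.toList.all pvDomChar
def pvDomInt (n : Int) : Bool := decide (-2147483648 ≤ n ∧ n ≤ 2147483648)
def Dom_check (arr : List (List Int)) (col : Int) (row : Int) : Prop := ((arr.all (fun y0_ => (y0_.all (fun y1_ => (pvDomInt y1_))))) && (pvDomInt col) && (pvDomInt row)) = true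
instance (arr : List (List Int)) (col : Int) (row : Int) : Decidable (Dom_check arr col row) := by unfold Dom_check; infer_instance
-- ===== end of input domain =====

-- B rewrites the cheese scan: it marks the cheese neighbors of each ≤ -1 air cell in a
-- 'touched' set, then collects the touched cells in a separate ordered pass (objective: alternative).

-- ===== PORT A =====
def pyDx : List Int := [0, 0, 1, -1]
def pyDy : List Int := [1, -1, 0, 0]
-- arr[y][x]; exact under Pre_check (every index used is in range; Python raises IndexError outside)
def cell (arr : List (List Int)) (y x : Int) : Int :=
  PySem.List.pyGetD (PySem.List.pyGetD arr y []) x 0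
-- 'x<0 or x>=row or y<0 or y>=col' for x = j+dx[k], y = i+dy[k]
def oobA (col row i j k : Int) : Bool :=
  decide (j + PySem.List.pyGetD pyDx k 0 < 0) || decide (j + PySem.List.pyGetD pyDx k 0 ≥ row) ||
  decide (i + PySem.List.pyGetD pyDy k 0 < 0) || decide (i + PySem.List.pyGetD pyDy k 0 ≥ col)
-- 'arr[y][x] <= -1' for the same x, y
def hitA (arr : List (List Int)) (i j k : Int) : Bool :=
  decide (cell arr (i + PySem.List.pyGetD pyDy k 0) (j + PySem.List.pyGetD pyDx k 0) ≤ -1)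

def check (arr : List (List Int)) (col : Int) (row : Int) : List (Int × Int) :=
  (PySem.List.pyRange 0 col 1).foldl (fun c i =>
    (PySem.List.pyRange 0 row 1).foldl (fun c j =>
      if cell arr i j = 1 then
        if (PySem.List.pyRange 0 4 1).foldl (fun (cnt : Int) k =>
             if oobA col row i j k then cnt
             else if hitA arr i j k then cnt + 1 else cnt) 0 > 0 then
          c ++ [(j, i)]
        else c
      else c) c) []

-- ===== PORT B =====
def nbrs (j i : Int) : List (Int × Int) := [(j + 1, i), (j - 1, i), (j, i + 1), (j, i - 1)]

def check_alt (arr : List (List Int)) (col : Int) (row : Int) : List (Int × Int) :=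
  let touched : PySem.Set (Int × Int) :=
    (PySem.List.pyRange 0 col 1).foldl (fun t i =>
      (PySem.List.pyRange 0 row 1).foldl (fun t j =>
        if cell arr i j ≤ -1 then
          (nbrs j i).foldl (fun t p =>
            if 0 ≤ p.1 ∧ p.1 < row ∧ 0 ≤ p.2 ∧ p.2 < col ∧ cell arr p.2 p.1 = 1 then
              PySem.Set.add t p
            else t) t
        else t) t) PySem.Set.empty
  (PySem.List.pyRange 0 col 1).foldl (fun c i =>
    (PySem.List.pyRange 0 row 1).foldl (fun c j =>
      if (j, i) ∈ touched then c ++ [(j, i)] else c) c) []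

-- ===== PRECONDITION & SPEC =====
-- Pre_check excludes exactly the inputs where Python A raises IndexError: when both loop
-- bounds are positive (0 < col and 0 < row), arr must have at least col rows and each of the
-- first col rows at least row entries; otherwise no cell is ever indexed and A returns [].
def Pre_check (arr : List (List Int)) (col : Int) (row : Int) : Prop :=
  0 < col → 0 < row → (col ≤ (arr.length : Int) ∧ ∀ r ∈ arr.take col.toNat, row ≤ (r.length : Int))
instance (arr : List (List Int)) (col : Int) (row : Int) : Decidable (Pre_check arr col row) := by unfold Pre_check; infer_instance
def pvWitness_check : List (List Int) × Int × Int := ([[1, -1], [0, 1]], 2, 2)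

def Spec_check (arr : List (List Int)) (col : Int) (row : Int) (out : List (Int × Int)) : Prop := out = check_alt arr col row
instance (arr : List (List Int)) (col : Int) (row : Int) (out : List (Int × Int)) : Decidable (Spec_check arr col row out) := by unfold Spec_check; infer_instance

-- ===== CLAIM (what is proved, stated in full; the proofs are below) =====
def Claim_equal_check : Prop := ∀ (arr : List (List Int)) (col : Int) (row : Int), Dom_check arr col row → Pre_check arr col row → Spec_check arr col row (check arr col row)

-- ===== LEMMAS AND PROOFS =====

-- membership through a fold that only conditionally inserts into a PySem.Set
lemma mem_foldl_step {α β : Type} [BEq β] [LawfulBEq β] (step : PySem.Set β → α → PySem.Set β)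
    (Q : α → β → Prop) (h : ∀ t x p, p ∈ step t x ↔ p ∈ t ∨ Q x p) :
    ∀ (l : List α) (t : PySem.Set β) (p : β), p ∈ l.foldl step t ↔ p ∈ t ∨ ∃ x ∈ l, Q x p := by
  intro l
  induction l with
  | nil => simp
  | cons x xs ih => intro t p; simp [List.foldl_cons, ih, h]; tauto

def good (arr : List (List Int)) (col row : Int) (p : Int × Int) : Prop :=
  0 ≤ p.1 ∧ p.1 < row ∧ 0 ≤ p.2 ∧ p.2 < col ∧ cell arr p.2 p.1 = 1

lemma mem_touched (arr : List (List Int)) (col row : Int) (p : Int × Int) :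
    p ∈ (PySem.List.pyRange 0 col 1).foldl (fun t i =>
      (PySem.List.pyRange 0 row 1).foldl (fun t j =>
        if cell arr i j ≤ -1 then
          (nbrs j i).foldl (fun t q =>
            if 0 ≤ q.1 ∧ q.1 < row ∧ 0 ≤ q.2 ∧ q.2 < col ∧ cell arr q.2 q.1 = 1 then
              PySem.Set.add t q
            else t) t
        else t) t) (PySem.Set.empty : PySem.Set (Int × Int)) ↔
    ∃ i ∈ PySem.List.pyRange 0 col 1, ∃ j ∈ PySem.List.pyRange 0 row 1,
      cell arr i j ≤ -1 ∧ ∃ x ∈ nbrs j i, good arr col row x ∧ p = x := by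
  rw [mem_foldl_step _ (fun i p => ∃ j ∈ PySem.List.pyRange 0 row 1,
      cell arr i j ≤ -1 ∧ ∃ x ∈ nbrs j i, good arr col row x ∧ p = x)]
  · simp [PySem.Set.empty]
  intro t i p
  rw [mem_foldl_step _ (fun j p => cell arr i j ≤ -1 ∧ ∃ x ∈ nbrs j i, good arr col row x ∧ p = x)]
  intro t j p
  by_cases hc : cell arr i j ≤ -1
  · simp only [if_pos hc]
    rw [mem_foldl_step _ (fun x p => good arr col row x ∧ p = x)]
    · tauto
    intro t x p
    unfold good
    by_cases hg : 0 ≤ x.1 ∧ x.1 < row ∧ 0 ≤ x.2 ∧ x.2 < col ∧ cell arr x.2 x.1 = 1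
    · simp [PySem.Set.mem_add, hg]
    · simp [hg]
  · simp [hc]

lemma foldl_two_ite_pos (P Q : Int → Bool) :
    ∀ (l : List Int) (a : Int), 0 ≤ a →
      (0 < l.foldl (fun cnt k => if P k then cnt else if Q k then cnt + 1 else cnt) a ↔
        0 < a ∨ ∃ k ∈ l, P k = false ∧ Q k = true) := by
  intro l
  induction l with
  | nil => intro a _; simp
  | cons x xs ih =>
    intro a ha
    simp only [List.foldl_cons, List.mem_cons]
    by_cases hP : P x = true
    · rw [if_pos hP, ih a ha]
      constructor
      · rintro (h | ⟨k, hk, h⟩)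
        · exact Or.inl h
        · exact Or.inr ⟨k, Or.inr hk, h⟩
      · rintro (h | ⟨k, hk | hk, h⟩)
        · exact Or.inl h
        · subst hk; rw [hP] at h; exact absurd h.1 (by simp)
        · exact Or.inr ⟨k, hk, h⟩
    · rw [if_neg hP]
      have hPf : P x = false := eq_false_of_ne_true hP
      by_cases hQ : Q x = true
      · rw [if_pos hQ, ih (a + 1) (by omega)]
        constructor
        · intro _; exact Or.inr ⟨x, Or.inl rfl, hPf, hQ⟩
        · intro _; left; omega
      · rw [if_neg hQ, ih a ha]
        constructor
        · rintro (h | ⟨k, hk, h⟩)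
          · exact Or.inl h
          · exact Or.inr ⟨k, Or.inr hk, h⟩
        · rintro (h | ⟨k, hk | hk, h⟩)
          · exact Or.inl h
          · subst hk; exact absurd h.2 hQ
          · exact Or.inr ⟨k, hk, h⟩

lemma cnt_pos (arr : List (List Int)) (col row i j : Int) :
    ((PySem.List.pyRange 0 4 1).foldl (fun (cnt : Int) k =>
        if oobA col row i j k then cnt
        else if hitA arr i j k then cnt + 1 else cnt) 0 > 0) ↔
    ∃ k ∈ PySem.List.pyRange 0 4 1, oobA col row i j k = false ∧ hitA arr i j k = true := by
  have base := foldl_two_ite_pos (oobA col row i j) (hitA arr i j)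
    (PySem.List.pyRange 0 4 1) 0 le_rfl
  simpa using base

-- the geometric core: a cheese cell (inside the grid) has a ≤ -1 neighbor (A's view)
-- iff some in-grid ≤ -1 cell has it as an in-bounds cheese neighbor (B's view)
lemma bridge (arr : List (List Int)) (col row i j : Int)
    (hi0 : 0 ≤ i) (hic : i < col) (hj0 : 0 ≤ j) (hjr : j < row) (h1 : cell arr i j = 1) :
    (∃ k ∈ PySem.List.pyRange 0 4 1, oobA col row i j k = false ∧ hitA arr i j k = true) ↔
    (∃ i' ∈ PySem.List.pyRange 0 col 1, ∃ j' ∈ PySem.List.pyRange 0 row 1,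
      cell arr i' j' ≤ -1 ∧ ∃ x ∈ nbrs j' i', good arr col row x ∧ ((j, i) : Int × Int) = x) := by
  constructor
  · rintro ⟨k, hk, hoob, hhit⟩
    rw [PySem.List.mem_pyRange_one] at hk
    obtain ⟨hk0, hk4⟩ := hk
    simp only [oobA, Bool.or_eq_false_iff, decide_eq_false_iff_not, not_lt, ge_iff_le,
      not_le] at hoob
    simp only [hitA, decide_eq_true_eq] at hhit
    interval_cases k <;>
      simp only [show PySem.List.pyGetD pyDx 0 0 = 0 from by decide,
        show PySem.List.pyGetD pyDx 1 0 = 0 from by decide,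
        show PySem.List.pyGetD pyDx 2 0 = 1 from by decide,
        show PySem.List.pyGetD pyDx 3 0 = -1 from by decide,
        show PySem.List.pyGetD pyDy 0 0 = 1 from by decide,
        show PySem.List.pyGetD pyDy 1 0 = -1 from by decide,
        show PySem.List.pyGetD pyDy 2 0 = 0 from by decide,
        show PySem.List.pyGetD pyDy 3 0 = 0 from by decide, add_zero] at hoob hhit
    · -- k = 0 : air cell below, (i+1, j)
      refine ⟨i + 1, by rw [PySem.List.mem_pyRange_one]; omega,
        j, by rw [PySem.List.mem_pyRange_one]; omega, hhit,
        (j, i), ?_, ⟨hj0, hjr, hi0, hic, h1⟩, rfl⟩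
      simp only [nbrs, List.mem_cons, Prod.mk.injEq, List.not_mem_nil, or_false]
      exact Or.inr (Or.inr (Or.inr ⟨trivial, by omega⟩))
    · refine ⟨i - 1, by rw [PySem.List.mem_pyRange_one]; omega,
        j, by rw [PySem.List.mem_pyRange_one]; omega, hhit,
        (j, i), ?_, ⟨hj0, hjr, hi0, hic, h1⟩, rfl⟩
      simp only [nbrs, List.mem_cons, Prod.mk.injEq, List.not_mem_nil, or_false]
      exact Or.inr (Or.inr (Or.inl ⟨trivial, by omega⟩))
    · refine ⟨i, by rw [PySem.List.mem_pyRange_one]; omega,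
        j + 1, by rw [PySem.List.mem_pyRange_one]; omega, hhit,
        (j, i), ?_, ⟨hj0, hjr, hi0, hic, h1⟩, rfl⟩
      simp only [nbrs, List.mem_cons, Prod.mk.injEq, List.not_mem_nil, or_false]
      exact Or.inr (Or.inl ⟨by omega, trivial⟩)
    · refine ⟨i, by rw [PySem.List.mem_pyRange_one]; omega,
        j - 1, by rw [PySem.List.mem_pyRange_one]; omega, hhit,
        (j, i), ?_, ⟨hj0, hjr, hi0, hic, h1⟩, rfl⟩
      simp only [nbrs, List.mem_cons, Prod.mk.injEq, List.not_mem_nil, or_false]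
      exact Or.inl ⟨by omega, trivial⟩
  · rintro ⟨i', hi', j', hj', hair, x, hx, _, hpx⟩
    subst hpx
    rw [PySem.List.mem_pyRange_one] at hi' hj'
    simp only [nbrs, List.mem_cons, List.not_mem_nil, or_false, Prod.mk.injEq] at hx
    have hgd : ∀ (k : Int), k = 0 ∨ k = 1 ∨ k = 2 ∨ k = 3 →
        (0 ≤ j + PySem.List.pyGetD pyDx k 0 ∧ j + PySem.List.pyGetD pyDx k 0 < row ∧
         0 ≤ i + PySem.List.pyGetD pyDy k 0 ∧ i + PySem.List.pyGetD pyDy k 0 < col ∧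
         cell arr (i + PySem.List.pyGetD pyDy k 0) (j + PySem.List.pyGetD pyDx k 0) ≤ -1) →
        ∃ k ∈ PySem.List.pyRange 0 4 1, oobA col row i j k = false ∧ hitA arr i j k = true := by
      rintro k hk ⟨a1, a2, a3, a4, a5⟩
      refine ⟨k, by rw [PySem.List.mem_pyRange_one]; omega, ?_, ?_⟩
      · simp only [oobA, Bool.or_eq_false_iff, decide_eq_false_iff_not, not_lt, ge_iff_le,
          not_le]
        exact ⟨⟨⟨a1, a2⟩, a3⟩, a4⟩
      · simp only [hitA, decide_eq_true_eq]; exact a5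
    rcases hx with ⟨e1, e2⟩ | ⟨e1, e2⟩ | ⟨e1, e2⟩ | ⟨e1, e2⟩
    · -- x = (j'+1, i') : j = j'+1, i = i'; neighbor via dx = -1 (k = 3)
      refine hgd 3 (by omega) ?_
      simp only [show PySem.List.pyGetD pyDx 3 0 = -1 from by decide,
        show PySem.List.pyGetD pyDy 3 0 = 0 from by decide, add_zero]
      constructor; omega; constructor; omega; constructor; omega; constructor; omega
      rw [show j + -1 = j' from by omega, show i = i' from e2]; exact hair
    · refine hgd 2 (by omega) ?_
      simp only [show PySem.List.pyGetD pyDx 2 0 = 1 from by decide,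
        show PySem.List.pyGetD pyDy 2 0 = 0 from by decide, add_zero]
      constructor; omega; constructor; omega; constructor; omega; constructor; omega
      rw [show j + 1 = j' from by omega, show i = i' from e2]; exact hair
    · refine hgd 1 (by omega) ?_
      simp only [show PySem.List.pyGetD pyDx 1 0 = 0 from by decide,
        show PySem.List.pyGetD pyDy 1 0 = -1 from by decide, add_zero]
      constructor; omega; constructor; omega; constructor; omega; constructor; omega
      rw [show i + -1 = i' from by omega, show j = j' from e1]; exact hair
    · refine hgd 0 (by omega) ?_
      simp only [show PySem.List.pyGetD pyDx 0 0 = 0 from by decide,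
        show PySem.List.pyGetD pyDy 0 0 = 1 from by decide, add_zero]
      constructor; omega; constructor; omega; constructor; omega; constructor; omega
      rw [show i + 1 = i' from by omega, show j = j' from e1]; exact hair

-- ===== VERDICT =====
theorem check_spec : Claim_equal_check := by
  intro arr col row _ _
  unfold Spec_check check check_alt
  simp only []
  apply PySem.List.foldl_congr_mem'
  intro i hi c
  apply PySem.List.foldl_congr_mem'
  intro j hj c'
  rw [PySem.List.mem_pyRange_one] at hi hj
  by_cases h1 : cell arr i j = 1
  · rw [if_pos h1]
    by_cases h2 : (PySem.List.pyRange 0 4 1).foldl (fun (cnt : Int) k =>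
        if oobA col row i j k then cnt
        else if hitA arr i j k then cnt + 1 else cnt) 0 > 0
    · rw [if_pos h2]
      have hmem : ((j, i) : Int × Int) ∈ (PySem.List.pyRange 0 col 1).foldl (fun t i =>
          (PySem.List.pyRange 0 row 1).foldl (fun t j =>
            if cell arr i j ≤ -1 then
              (nbrs j i).foldl (fun t q =>
                if 0 ≤ q.1 ∧ q.1 < row ∧ 0 ≤ q.2 ∧ q.2 < col ∧ cell arr q.2 q.1 = 1 then
                  PySem.Set.add t q
                else t) t
            else t) t) (PySem.Set.empty : PySem.Set (Int × Int)) := by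
        rw [mem_touched]
        exact (bridge arr col row i j hi.1 hi.2 hj.1 hj.2 h1).mp ((cnt_pos arr col row i j).mp h2)
      rw [if_pos hmem]
    · rw [if_neg h2]
      have hmem : ¬ ((j, i) : Int × Int) ∈ (PySem.List.pyRange 0 col 1).foldl (fun t i =>
          (PySem.List.pyRange 0 row 1).foldl (fun t j =>
            if cell arr i j ≤ -1 then
              (nbrs j i).foldl (fun t q =>
                if 0 ≤ q.1 ∧ q.1 < row ∧ 0 ≤ q.2 ∧ q.2 < col ∧ cell arr q.2 q.1 = 1 then
                  PySem.Set.add t q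
                else t) t
            else t) t) (PySem.Set.empty : PySem.Set (Int × Int)) := by
        rw [mem_touched]
        intro hm
        exact h2 ((cnt_pos arr col row i j).mpr
          ((bridge arr col row i j hi.1 hi.2 hj.1 hj.2 h1).mpr hm))
      rw [if_neg hmem]
  · rw [if_neg h1]
    have hmem : ¬ ((j, i) : Int × Int) ∈ (PySem.List.pyRange 0 col 1).foldl (fun t i =>
        (PySem.List.pyRange 0 row 1).foldl (fun t j =>
          if cell arr i j ≤ -1 then
            (nbrs j i).foldl (fun t q =>
              if 0 ≤ q.1 ∧ q.1 < row ∧ 0 ≤ q.2 ∧ q.2 < col ∧ cell arr q.2 q.1 = 1 then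
                PySem.Set.add t q
              else t) t
          else t) t) (PySem.Set.empty : PySem.Set (Int × Int)) := by
      rw [mem_touched]
      rintro ⟨i', _, j', _, _, x, _, hg, hpx⟩
      subst hpx
      exact h1 hg.2.2.2.2
    rw [if_neg hmem]
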